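-- pv_equiv track=rewrite | github.com/Knack117/Mightstone-GPT | utils/commander_identity.py | canonicalize_color_identity
-- ===== SOURCE A (Python) =====
-- from typing import List, Tuple
--
-- def canonicalize_color_identity(colors: List[str]) -> str:
--     """
--     Convert color list to standardized color identity string.
--
--     Args:
--         colors: List of color codes (e.g., ['W', 'U', 'R'])
--
--     Returns:
--         Canonicalized color identity string
--     """
--     if not colors:
--         return "C"  # Colorless
--
--     # Standard order: W, U, B, R, G
--     color_order = ['W', 'U', 'B', 'R', 'G']
--     present_colors = [color for color in color_order if color in colors]
--
--     if len(present_colors) == 0: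
--         return "C"  # Colorless
--     elif len(present_colors) == 5:
--         return "WUBRG"  # Five color
--     else:
--         return ''.join(present_colors)
-- ===== SOURCE B (Python) =====
-- def canonicalize_color_identity(colors):
--     """
--     Convert color list to standardized color identity string.
--     """
--     rank = {'W': 0, 'U': 1, 'B': 2, 'R': 3, 'G': 4}
--     present = sorted({c for c in colors if c in rank}, key=rank.get)
--     return ''.join(present) or 'C'
-- ===== Notes on version B (the rewrite author's own statement) =====
-- stated objective: idiomatic
-- what changed: Instead of scanning the fixed canonical order and testing membership in the input, B builds a rank dict, dedupes/filters the input colors through a set comprehension, sorts them by their looked-up rank and joins, falling back to 'C' on the empty string.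
import Mathlib
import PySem

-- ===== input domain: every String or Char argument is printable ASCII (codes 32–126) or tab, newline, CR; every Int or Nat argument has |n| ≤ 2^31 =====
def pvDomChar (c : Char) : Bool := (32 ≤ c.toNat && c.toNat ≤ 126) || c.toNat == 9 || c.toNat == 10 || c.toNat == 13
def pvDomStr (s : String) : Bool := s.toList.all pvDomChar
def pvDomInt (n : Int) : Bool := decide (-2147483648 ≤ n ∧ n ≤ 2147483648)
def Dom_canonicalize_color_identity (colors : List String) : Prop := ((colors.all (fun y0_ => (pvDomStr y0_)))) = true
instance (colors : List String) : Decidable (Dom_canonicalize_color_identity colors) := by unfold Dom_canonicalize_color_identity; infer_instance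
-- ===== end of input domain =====

-- B replaces the scan of the fixed canonical order with: dedupe/filter the input via a set,
-- sort the colors by their rank looked up in a dict, join, and fall back to "C" on the empty
-- string (idiomatic restructuring; no speed claim).

-- ===== PORT A =====
def canonicalize_color_identity (colors : List String) : String :=
  if colors = [] then "C"
  else
    let color_order : List String := ["W", "U", "B", "R", "G"]
    let present_colors := color_order.filter (fun c => colors.contains c)
    if present_colors.length = 0 then "C"
    else if present_colors.length = 5 then "WUBRG"
    else PySem.Str.join "" present_colors

-- ===== PORT B =====
-- rank.get is total on every element sorted here (all lie in rank), so getD _ 0 is exact.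
def canonicalize_color_identity_alt (colors : List String) : String :=
  let rank : PySem.Dict String Int :=
    PySem.Dict.ofList [("W", 0), ("U", 1), ("B", 2), ("R", 3), ("G", 4)]
  let present := PySem.List.sorted
    (PySem.Set.ofList (colors.filter (fun c => PySem.Dict.contains rank c)))
    (fun c => PySem.Dict.getD rank c 0) false
  let s := PySem.Str.join "" present
  if s = "" then "C" else s

-- ===== PRECONDITION & SPEC =====
def Spec_canonicalize_color_identity (colors : List String) (out : String) : Prop := out = canonicalize_color_identity_alt colors
instance (colors : List String) (out : String) : Decidable (Spec_canonicalize_color_identity colors out) := by unfold Spec_canonicalize_color_identity; infer_instance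

-- ===== CLAIM (what is proved, stated in full; the proofs are below) =====
def Claim_equal_canonicalize_color_identity : Prop := ∀ (colors : List String), Dom_canonicalize_color_identity colors → Spec_canonicalize_color_identity colors (canonicalize_color_identity colors)

-- ===== LEMMAS AND PROOFS =====

-- The literal rank dict contains exactly the five canonical color codes.
theorem rank_contains_eq (a : String) :
    (PySem.Dict.ofList [("W", (0:Int)), ("U", 1), ("B", 2), ("R", 3), ("G", 4)]).contains a
      = (["W", "U", "B", "R", "G"] : List String).contains a := by
  simp only [PySem.Dict.ofList, PySem.Dict.update, PySem.Dict.insert, PySem.Dict.empty,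
    PySem.Dict.contains, List.foldl, List.contains_eq_any_beq, List.any]
  simp [BEq.comm]

-- B's sorted/deduped list IS the canonical-order filter A builds.
theorem alt_sorted_eq (colors : List String) :
    PySem.List.sorted
      (PySem.Set.ofList (colors.filter (fun c =>
        PySem.Dict.contains (PySem.Dict.ofList [("W", (0:Int)), ("U", 1), ("B", 2), ("R", 3), ("G", 4)]) c)))
      (fun c => PySem.Dict.getD (PySem.Dict.ofList [("W", (0:Int)), ("U", 1), ("B", 2), ("R", 3), ("G", 4)]) c 0) false
    = (["W", "U", "B", "R", "G"] : List String).filter (fun c => colors.contains c) := by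
  apply PySem.List.sorted_eq_of_perm_of_pairwise_lt
  · rw [List.perm_ext_iff_of_nodup]
    · intro a
      simp only [List.mem_filter, PySem.Set.mem_ofList, rank_contains_eq,
        List.contains_iff_mem]
      tauto
    · exact List.Nodup.filter _ (by decide)
    · exact PySem.Set.nodup_ofList _
  · exact List.Pairwise.sublist List.filter_sublist (by decide)

-- ===== VERDICT (by name: the statement is the Claim_ definition above) =====
theorem canonicalize_color_identity_spec : Claim_equal_canonicalize_color_identity := by
  intro colors _
  unfold Spec_canonicalize_color_identity canonicalize_color_identity canonicalize_color_identity_alt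
  simp only [alt_sorted_eq]
  by_cases hnil : colors = []
  · subst hnil; decide
  · rw [if_neg hnil]
    simp only [List.filter_cons, List.filter_nil]
    generalize colors.contains "W" = b1
    generalize colors.contains "U" = b2
    generalize colors.contains "B" = b3
    generalize colors.contains "R" = b4
    generalize colors.contains "G" = b5
    revert b1 b2 b3 b4 b5
    decide
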